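-- pv_equiv track=rewrite | github.com/heavenring/BackJoonCode | 프로그래머스/2/42584. 주식가격/주식가격.py | solution
-- ===== SOURCE A (Python) =====
-- def solution(prices):
-- #     answer = []
--
-- #     prices = deque(prices)
--
-- #     i = 0
-- #     while len(prices):
-- #         count = 0
-- #         price = prices.popleft()
-- #         for p in prices:
-- #             count += 1
-- #             if price > p:
-- #                 break
--
-- #         answer.append(count)
--
--
--     answer = [0] * len(prices)
--     stack = [] # 주식 가격이 들어갈 stack
--     for i in range(len(prices)):
--         # stack에 들어간 주식 가격이 떨어진다면
--         while stack != [] and stack[-1][1] > prices[i]: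
--             # 해당 주식이 떨어질때 까지 걸린 시간 계산
--             index, _ = stack.pop()
--             answer[index] = i - index
--
--         # stack에 현재 주식 저장
--         stack.append([i, prices[i]])
--
--     # 마지막까지 떨어지지 않은 주식 계산
--     for i, _ in stack:
--         answer[i] = len(prices) - i - 1
--
--     return answer
-- ===== SOURCE B (Python) =====
-- def solution(prices):
--     n = len(prices)
--     answer = [0] * n
--     for i in range(n):
--         c = 0
--         for j in range(i + 1, n):
--             c += 1
--             if prices[i] > prices[j]:
--                 break
--         answer[i] = c
--     return answer
-- ===== Notes on version B (the rewrite author's own statement) =====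
-- stated objective: simpler
-- what changed: Replaced the monotonic-stack algorithm (with a final pass for never-dropping indices) by a direct brute-force nested scan: for each index, count steps until the first strictly smaller price.
import Mathlib
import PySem

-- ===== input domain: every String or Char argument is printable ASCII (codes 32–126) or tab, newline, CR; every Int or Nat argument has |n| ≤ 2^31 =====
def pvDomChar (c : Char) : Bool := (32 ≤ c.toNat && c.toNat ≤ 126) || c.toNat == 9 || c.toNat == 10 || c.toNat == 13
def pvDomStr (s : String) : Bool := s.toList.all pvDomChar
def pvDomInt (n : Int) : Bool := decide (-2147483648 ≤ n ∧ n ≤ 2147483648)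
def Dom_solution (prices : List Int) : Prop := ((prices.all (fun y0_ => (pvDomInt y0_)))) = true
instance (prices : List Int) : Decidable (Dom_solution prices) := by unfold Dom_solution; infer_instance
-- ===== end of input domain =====

-- B replaces A's monotonic stack by a plain brute-force nested scan (simpler, not faster).

-- ===== PORT A =====
-- the inner `while stack != [] and stack[-1][1] > prices[i]` loop; stack top is the list head
def popLoop (i : Nat) (p : Int) (ans : List Int) (stack : List (Nat × Int)) :
    List Int × List (Nat × Int) :=
  match stack with
  | [] => (ans, [])
  | (k, v) :: rest =>
      if v > p then popLoop i p (ans.set k ((i : Int) - (k : Int))) rest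
      else (ans, (k, v) :: rest)

-- one iteration of `for i in range(len(prices))`
def stepA (prices : List Int) (st : List Int × List (Nat × Int)) (i : Nat) :
    List Int × List (Nat × Int) :=
  let p := prices.getD i 0
  let r := popLoop i p st.1 st.2
  (r.1, (i, p) :: r.2)

def solution (prices : List Int) : List Int :=
  let n := prices.length
  let r := (List.range n).foldl (stepA prices) (List.replicate n 0, [])
  -- final `for i, _ in stack:` pass (bottom of the stack first, as in Python)
  r.2.reverse.foldl (fun a kv => a.set kv.1 ((n : Int) - (kv.1 : Int) - 1)) r.1

-- ===== PORT B =====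
-- the inner `for j in range(i+1, n)` counting loop with its break
def countFrom (p : Int) (l : List Int) : Int :=
  match l with
  | [] => 0
  | q :: qs => if p > q then 1 else 1 + countFrom p qs

def solution_alt (prices : List Int) : List Int :=
  (List.range prices.length).map (fun i => countFrom (prices.getD i 0) (prices.drop (i + 1)))

-- ===== PRECONDITION & SPEC =====
def Spec_solution (prices : List Int) (out : List Int) : Prop := out = solution_alt prices
instance (prices : List Int) (out : List Int) : Decidable (Spec_solution prices out) := by unfold Spec_solution; infer_instance

-- ===== CLAIM (what is proved, stated in full; the proofs are below) =====
def Claim_equal_solution : Prop := ∀ (prices : List Int), Dom_solution prices → Spec_solution prices (solution prices)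

-- ===== LEMMAS AND PROOFS =====

-- `noDropB prices k m` : price k never strictly drops before step m
def noDropB (prices : List Int) (k m : Nat) : Bool :=
  (List.range m).all (fun j => decide (k < j → prices.getD k 0 ≤ prices.getD j 0))

-- B's per-index value
def target (prices : List Int) (k : Nat) : Int :=
  countFrom (prices.getD k 0) (prices.drop (k + 1))

-- indices still on the stack after step m-1, bottom first
def SA (prices : List Int) (m : Nat) : List Nat :=
  (List.range m).filter (fun k => noDropB prices k m)

-- A's state after processing i = 0 .. m-1
def stA (prices : List Int) (m : Nat) : List Int × List (Nat × Int) :=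
  (List.range m).foldl (stepA prices) (List.replicate prices.length 0, [])

theorem noDropB_iff (prices : List Int) (k m : Nat) :
    noDropB prices k m = true ↔ ∀ j, j < m → k < j → prices.getD k 0 ≤ prices.getD j 0 := by
  simp only [noDropB, List.all_eq_true, List.mem_range, decide_eq_true_eq]

theorem popLoop_eq (i : Nat) (p : Int) :
    ∀ (stack : List (Nat × Int)) (ans : List Int),
      popLoop i p ans stack =
        ((stack.takeWhile (fun kv => decide (kv.2 > p))).foldl
            (fun a kv => a.set kv.1 ((i : Int) - (kv.1 : Int))) ans,
          stack.dropWhile (fun kv => decide (kv.2 > p))) := by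
  intro stack
  induction stack with
  | nil => intro ans; simp [popLoop]
  | cons a rest ih =>
    intro ans
    obtain ⟨k, v⟩ := a
    by_cases h : v > p
    · simp [popLoop, h, ih]
    · simp [popLoop, h]

theorem takeWhile_eq_filter_of_pairwise {α : Type} (f : α → Bool) :
    ∀ (l : List α), List.Pairwise (fun a b => f b = true → f a = true) l →
      l.takeWhile f = l.filter f ∧ l.dropWhile f = l.filter (fun x => !f x) := by
  intro l
  induction l with
  | nil => simp
  | cons a t ih =>
    intro hp
    rw [List.pairwise_cons] at hp
    obtain ⟨ha, ht⟩ := hp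
    by_cases h : f a = true
    · have := ih ht
      simp [h, this.1, this.2]
    · have h1 : t.filter f = [] := by
        rw [List.filter_eq_nil_iff]
        intro b hb hfb
        exact h (ha b hb hfb)
      have h2 : t.filter (fun x => !f x) = t := by
        rw [List.filter_eq_self]
        intro b hb
        simp only [Bool.not_eq_true']
        by_contra hc
        simp only [Bool.not_eq_false] at hc
        exact h (ha b hb hc)
      simp [h, h1, h2]

theorem foldl_set_length (v : Nat → Int) :
    ∀ (l : List (Nat × Int)) (ans : List Int),
      (l.foldl (fun a kv => a.set kv.1 (v kv.1)) ans).length = ans.length := by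
  intro l
  induction l with
  | nil => intro ans; rfl
  | cons a t ih => intro ans; simp [List.foldl_cons, ih]

theorem foldl_set_getD_notmem (v : Nat → Int) (k : Nat) :
    ∀ (l : List (Nat × Int)) (ans : List Int), (∀ kv ∈ l, kv.1 ≠ k) →
      (l.foldl (fun a kv => a.set kv.1 (v kv.1)) ans).getD k 0 = ans.getD k 0 := by
  intro l
  induction l with
  | nil => intro ans _; rfl
  | cons a t ih =>
    intro ans h
    rw [List.foldl_cons, ih _ (fun kv hkv => h kv (List.mem_cons_of_mem _ hkv))]
    have hne : a.1 ≠ k := h a (List.mem_cons_self ..)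
    simp [List.getD, List.getElem?_set_ne hne]

theorem foldl_set_getD_mem (v : Nat → Int) (k : Nat) :
    ∀ (l : List (Nat × Int)) (ans : List Int), (l.map Prod.fst).Nodup →
      k ∈ l.map Prod.fst → k < ans.length →
      (l.foldl (fun a kv => a.set kv.1 (v kv.1)) ans).getD k 0 = v k := by
  intro l
  induction l with
  | nil => intro ans _ h _; simp at h
  | cons a t ih =>
    intro ans hnd hk hlen
    rw [List.map_cons, List.nodup_cons] at hnd
    rw [List.map_cons, List.mem_cons] at hk
    rw [List.foldl_cons]
    rcases hk with hk | hk
    · subst hk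
      have hnot : ∀ kv ∈ t, kv.1 ≠ a.1 := by
        intro kv hkv hc
        exact hnd.1 (hc ▸ List.mem_map_of_mem hkv)
      rw [foldl_set_getD_notmem v a.1 t _ hnot]
      simp [List.getD, hlen]
    · rw [ih _ hnd.2 hk (by simpa using hlen)]

theorem countFrom_of_all (p : Int) :
    ∀ (l : List Int), (∀ q ∈ l, p ≤ q) → countFrom p l = (l.length : Int) := by
  intro l
  induction l with
  | nil => intro _; rfl
  | cons q qs ih =>
    intro h
    have hq : ¬ p > q := not_lt.mpr (h q (List.mem_cons_self ..))
    rw [countFrom, if_neg hq, ih (fun x hx => h x (List.mem_cons_of_mem _ hx))]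
    simp
    ring

theorem countFrom_break (p : Int) :
    ∀ (l : List Int) (t : Nat), t < l.length → l.getD t 0 < p →
      (∀ s, s < t → p ≤ l.getD s 0) → countFrom p l = (t : Int) + 1 := by
  intro l
  induction l with
  | nil => intro t ht; simp at ht
  | cons q qs ih =>
    intro t ht hd hs
    cases t with
    | zero =>
      simp only [List.getD_cons_zero] at hd
      rw [countFrom, if_pos hd]
      simp
    | succ t' =>
      have hq : ¬ p > q := not_lt.mpr (by simpa using hs 0 (Nat.succ_pos _))
      rw [countFrom, if_neg hq,
        ih t' (by simpa using ht) (by simpa using hd)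
          (fun s hst => by simpa using hs (s + 1) (by omega))]
      push_cast
      ring

theorem getD_drop (l : List Int) (n t : Nat) (h : n + t < l.length) :
    (l.drop n).getD t 0 = l.getD (n + t) 0 := by
  rw [List.getD_eq_getElem _ _ (by simp; omega), List.getD_eq_getElem _ _ h,
    List.getElem_drop]

theorem target_of_noDrop (prices : List Int) (k : Nat) (hk : k < prices.length)
    (h : noDropB prices k prices.length = true) :
    target prices k = (prices.length : Int) - (k : Int) - 1 := by
  rw [noDropB_iff] at h
  rw [target, countFrom_of_all]
  · simp
    omega
  · intro q hq
    obtain ⟨t, ht, rfl⟩ := List.mem_iff_getElem.mp hq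
    have hlen : (k + 1) + t < prices.length := by
      have := ht; simp at this; omega
    have : (prices.drop (k + 1))[t] = (prices.drop (k + 1)).getD t 0 := by
      rw [List.getD_eq_getElem _ _ ht]
    rw [this, getD_drop _ _ _ hlen]
    exact h _ hlen (by omega)

theorem target_of_firstDrop (prices : List Int) (k m : Nat) (hk : k < m)
    (hm : m < prices.length) (h : noDropB prices k m = true)
    (hd : prices.getD m 0 < prices.getD k 0) :
    target prices k = (m : Int) - (k : Int) := by
  rw [noDropB_iff] at h
  have hkm : (k + 1) + (m - (k + 1)) = m := by omega
  rw [target, countFrom_break _ _ (m - (k + 1))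
      (by simp; omega)
      (by rw [getD_drop _ _ _ (by omega : (k+1) + (m - (k+1)) < prices.length), hkm]; exact hd)
      (fun s hst => by
        rw [getD_drop _ _ _ (by omega : (k+1) + s < prices.length)]
        exact h _ (by omega) (by omega))]
  push_cast [Nat.cast_sub (by omega : k + 1 ≤ m)]
  ring

theorem mem_SA (prices : List Int) (m k : Nat) :
    k ∈ SA prices m ↔ k < m ∧ noDropB prices k m = true := by
  simp [SA]

theorem nodup_SA (prices : List Int) (m : Nat) : (SA prices m).Nodup :=
  List.nodup_range.filter _

theorem noDropB_self (prices : List Int) (m : Nat) : noDropB prices m (m + 1) = true := by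
  rw [noDropB_iff]
  intro j hj hmj
  exact ((by omega : False)).elim

theorem noDropB_succ (prices : List Int) (m k : Nat) (hk : k < m) :
    noDropB prices k (m + 1) =
      (noDropB prices k m && decide (prices.getD k 0 ≤ prices.getD m 0)) := by
  rw [noDropB, noDropB, List.range_succ, List.all_append]
  simp [hk]

theorem SA_succ (prices : List Int) (m : Nat) :
    SA prices (m + 1) =
      (SA prices m).filter (fun k => decide (prices.getD k 0 ≤ prices.getD m 0)) ++ [m] := by
  have h1 : ∀ k ∈ List.range m, noDropB prices k (m + 1) =
      ((fun k => decide (prices.getD k 0 ≤ prices.getD m 0)) k && noDropB prices k m) := by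
    intro k hk
    rw [noDropB_succ prices m k (List.mem_range.mp hk), Bool.and_comm]
  rw [SA, List.range_succ, List.filter_append, List.filter_congr h1, ← List.filter_filter,
    List.filter_singleton, noDropB_self prices m]
  rfl

theorem invA (prices : List Int) :
    ∀ m, m ≤ prices.length →
      (stA prices m).1.length = prices.length ∧
      (stA prices m).2 = (SA prices m).reverse.map (fun k => (k, prices.getD k 0)) ∧
      ∀ k, k < m → noDropB prices k m = false → (stA prices m).1.getD k 0 = target prices k := by
  intro m
  induction m with
  | zero =>
    intro _
    refine ⟨by simp [stA], by simp [stA, SA], ?_⟩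
    intro k hk
    exact absurd hk (by omega)
  | succ m ih =>
    intro hm1
    have hmn : m < prices.length := hm1
    obtain ⟨ih1, ih2, ih3⟩ := ih (le_of_lt hmn)
    have hst : stA prices (m + 1) = stepA prices (stA prices m) m := by
      rw [stA, List.range_succ, List.foldl_append, List.foldl_cons, List.foldl_nil]
      rfl
    set p := prices.getD m 0 with hp
    set g : Nat → Nat × Int := fun k => (k, prices.getD k 0) with hg
    set f : Nat × Int → Bool := fun kv => decide (kv.2 > p) with hf
    -- the stack is sorted so that once the pop condition fails it fails below
    have hmono : ∀ k1 k2, k1 ∈ SA prices m → k2 ∈ SA prices m → k1 < k2 →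
        prices.getD k1 0 ≤ prices.getD k2 0 := by
      intro k1 k2 h1 h2 h12
      rw [mem_SA] at h1 h2
      exact (noDropB_iff prices k1 m).mp h1.2 k2 h2.1 h12
    have hpw : List.Pairwise (fun a b => f b = true → f a = true) (stA prices m).2 := by
      rw [ih2, show ((SA prices m).reverse.map g) = ((SA prices m).map g).reverse from
        List.map_reverse .., List.pairwise_reverse, List.pairwise_map]
      have hlt : List.Pairwise (· < ·) (SA prices m) := List.pairwise_lt_range.filter _
      refine hlt.imp_of_mem ?_
      intro a b ha hb hab h
      simp only [hf, hg, decide_eq_true_eq] at h ⊢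
      exact lt_of_lt_of_le h (hmono a b ha hb hab)
    obtain ⟨htake, hdrop⟩ := takeWhile_eq_filter_of_pairwise f (stA prices m).2 hpw
    have hpop := popLoop_eq m p (stA prices m).2 (stA prices m).1
    have hnew : stA prices (m + 1) =
        (((stA prices m).2.filter f).foldl
            (fun a kv => a.set kv.1 ((m : Int) - (kv.1 : Int))) (stA prices m).1,
          (m, p) :: (stA prices m).2.filter (fun x => !f x)) := by
      rw [hst, stepA, ← hp, hpop, htake, hdrop]
    have hnfg : ((fun x => !f x) ∘ g) = fun k => decide (prices.getD k 0 ≤ p) := by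
      funext k
      simp only [Function.comp, hf, hg]
      rw [← decide_not]
      exact decide_eq_decide.mpr not_lt
    have hstackfilt : ∀ (q : Nat × Int → Bool),
        (stA prices m).2.filter q = ((SA prices m).filter (q ∘ g)).reverse.map g := by
      intro q
      rw [ih2, List.filter_map, List.filter_reverse]
    have hL : ((stA prices m).2.filter f).map Prod.fst
        = ((SA prices m).filter (f ∘ g)).reverse := by
      rw [hstackfilt, List.map_reverse, List.map_reverse, List.map_map,
        show (Prod.fst ∘ g) = id from rfl, List.map_id]
    refine ⟨?_, ?_, ?_⟩
    · rw [hnew]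
      have hlen := foldl_set_length (fun x : Nat => (m : Int) - (x : Int))
        ((stA prices m).2.filter f) (stA prices m).1
      simp only at hlen
      dsimp only
      rw [hlen, ih1]
    · rw [hnew]
      dsimp only
      rw [hstackfilt, hnfg, SA_succ prices m]
      simp [hg, hp]
    · intro k hk hfalse
      by_cases hkm : k = m
      · subst hkm
        rw [noDropB_self] at hfalse
        exact absurd hfalse (by simp)
      have hklt : k < m := by omega
      rw [noDropB_succ prices m k hklt] at hfalse
      rw [hnew]
      dsimp only
      by_cases hnd : noDropB prices k m = true
      · -- first drop happens exactly at step m: k is popped now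
        have hc : ¬ prices.getD k 0 ≤ p := by
          rw [hnd, Bool.true_and] at hfalse
          simpa using hfalse
        have hkmem : k ∈ (SA prices m).filter (f ∘ g) := by
          rw [List.mem_filter, mem_SA]
          refine ⟨⟨hklt, hnd⟩, ?_⟩
          simp only [Function.comp, hf, hg, decide_eq_true_eq]
          omega
        have hmem : k ∈ ((stA prices m).2.filter f).map Prod.fst := by
          rw [hL, List.mem_reverse]
          exact hkmem
        have hndp : (((stA prices m).2.filter f).map Prod.fst).Nodup := by
          rw [hL]
          exact List.nodup_reverse.mpr ((nodup_SA prices m).filter _)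
        have hmain := foldl_set_getD_mem (fun x : Nat => (m : Int) - (x : Int)) k
          ((stA prices m).2.filter f) (stA prices m).1 hndp hmem (by rw [ih1]; omega)
        simp only at hmain
        rw [hmain]
        exact (target_of_firstDrop prices k m hklt hmn hnd (hp ▸ not_le.mp hc)).symm
      · -- k already popped earlier: untouched now
        have hnot : ∀ kv ∈ (stA prices m).2.filter f, kv.1 ≠ k := by
          intro kv hkv hcc
          have hmem2 : kv ∈ (stA prices m).2 := List.mem_of_mem_filter hkv
          rw [ih2] at hmem2
          obtain ⟨k', hk', hgk⟩ := List.mem_map.mp hmem2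
          have hk'SA : k' ∈ SA prices m := List.mem_reverse.mp hk'
          rw [mem_SA] at hk'SA
          have hkk : k' = k := by rw [← hcc, ← hgk]
          exact hnd (hkk ▸ hk'SA.2)
        have hmain := foldl_set_getD_notmem (fun x : Nat => (m : Int) - (x : Int)) k
          ((stA prices m).2.filter f) (stA prices m).1 hnot
        simp only at hmain
        rw [hmain]
        exact ih3 k hklt (by simpa using hnd)

-- ===== VERDICT (by name: the statement is the Claim_ definition above) =====
theorem solution_spec : Claim_equal_solution := by
  unfold Claim_equal_solution
  intro prices _
  unfold Spec_solution
  obtain ⟨h1, h2, h3⟩ := invA prices prices.length le_rfl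
  set n := prices.length with hn
  set g : Nat → Nat × Int := fun k => (k, prices.getD k 0) with hg
  have hsol : solution prices =
      ((SA prices n).map g).foldl
        (fun a kv => a.set kv.1 ((n : Int) - (kv.1 : Int) - 1)) (stA prices n).1 := by
    rw [solution, show (List.range prices.length).foldl (stepA prices)
        (List.replicate prices.length 0, []) = stA prices prices.length from rfl, h2,
      List.map_reverse, List.reverse_reverse]
  have hfst : (((SA prices n).map g).map Prod.fst) = SA prices n := by
    rw [List.map_map, show (Prod.fst ∘ g) = id from rfl, List.map_id]
  have hlen : (((SA prices n).map g).foldl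
      (fun a kv => a.set kv.1 ((n : Int) - (kv.1 : Int) - 1)) (stA prices n).1).length = n := by
    have := foldl_set_length (fun x : Nat => (n : Int) - (x : Int) - 1)
      ((SA prices n).map g) (stA prices n).1
    simp only at this
    rw [this, h1]
  have haltlen : (solution_alt prices).length = n := by
    simp only [solution_alt, List.length_map, List.length_range]
    exact hn.symm
  apply List.ext_getElem
  · rw [hsol, hlen, haltlen]
  · intro i hi1 hi2
    have hi : i < n := by rw [haltlen] at hi2; exact hi2
    have e2 : (solution_alt prices)[i] = target prices i := by
      simp [solution_alt, target]
    rw [e2]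
    have hi1' : i < (solution prices).length := hi1
    rw [show (solution prices)[i] = (solution prices).getD i 0 from
      (List.getD_eq_getElem _ _ hi1').symm, hsol]
    by_cases hnd : noDropB prices i n = true
    · have hmem : i ∈ ((SA prices n).map g).map Prod.fst := by
        rw [hfst, mem_SA]
        exact ⟨hi, hnd⟩
      have hndup : (((SA prices n).map g).map Prod.fst).Nodup := by
        rw [hfst]; exact nodup_SA prices n
      have hmain := foldl_set_getD_mem (fun x : Nat => (n : Int) - (x : Int) - 1) i
        ((SA prices n).map g) (stA prices n).1 hndup hmem (by rw [h1]; exact hi)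
      simp only at hmain
      rw [hmain]
      exact (target_of_noDrop prices i hi hnd).symm
    · have hnot : ∀ kv ∈ (SA prices n).map g, kv.1 ≠ i := by
        intro kv hkv hc
        obtain ⟨k', hk', hgk⟩ := List.mem_map.mp hkv
        rw [mem_SA] at hk'
        have hkk : k' = i := by rw [← hc, ← hgk]
        exact hnd (hkk ▸ hk'.2)
      have hmain := foldl_set_getD_notmem (fun x : Nat => (n : Int) - (x : Int) - 1) i
        ((SA prices n).map g) (stA prices n).1 hnot
      simp only at hmain
      rw [hmain]
      exact h3 i hi (by simpa using hnd)
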